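-- pv_equiv track=rewrite | github.com/tokeeto/shoggoth | shoggoth/export_helpers.py | _sced_icon_counts
-- ===== SOURCE A (Python) =====
-- _ICON_KEY_TO_SCED = {
--     'W': 'willpowerIcons',
--     'I': 'intellectIcons',
--     'C': 'combatIcons',
--     'A': 'agilityIcons',
--     'Q': 'wildIcons',
-- }
--
-- def _sced_icon_counts(face):
--     """Return dict of non-zero SCED icon count fields from a face."""
--     icons = face.get('icons', '')
--     counts = {}
--     for icon in icons:
--         key = _ICON_KEY_TO_SCED.get(icon)
--         if key:
--             counts[key] = counts.get(key, 0) + 1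
--     return counts
-- ===== SOURCE B (Python) =====
-- _ICON_KEY_TO_SCED = {
--     'W': 'willpowerIcons',
--     'I': 'intellectIcons',
--     'C': 'combatIcons',
--     'A': 'agilityIcons',
--     'Q': 'wildIcons',
-- }
--
--
-- def _go(chars):
--     """Recursively emit (field, total count) for the first mapped char, then
--     recurse on the remainder with that char removed."""
--     if not chars:
--         return {}
--     c, rest = chars[0], chars[1:]
--     field = _ICON_KEY_TO_SCED.get(c)
--     if field is None:
--         return _go(rest)
--     return {field: 1 + rest.count(c), **_go([x for x in rest if x != c])}
--
--
-- def _sced_icon_counts(face):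
--     """Return dict of non-zero SCED icon count fields from a face."""
--     return _go(list(face.get('icons', '')))
-- ===== Notes on version B (the rewrite author's own statement) =====
-- stated objective: alternative
-- what changed: B replaces A's single pass that maintains an incrementally-updated counting dict by a recursive decomposition: it takes the first mapped icon character, emits its total count via rest.count, and recurses on the remainder with all occurrences of that character filtered out.
import Mathlib
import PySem

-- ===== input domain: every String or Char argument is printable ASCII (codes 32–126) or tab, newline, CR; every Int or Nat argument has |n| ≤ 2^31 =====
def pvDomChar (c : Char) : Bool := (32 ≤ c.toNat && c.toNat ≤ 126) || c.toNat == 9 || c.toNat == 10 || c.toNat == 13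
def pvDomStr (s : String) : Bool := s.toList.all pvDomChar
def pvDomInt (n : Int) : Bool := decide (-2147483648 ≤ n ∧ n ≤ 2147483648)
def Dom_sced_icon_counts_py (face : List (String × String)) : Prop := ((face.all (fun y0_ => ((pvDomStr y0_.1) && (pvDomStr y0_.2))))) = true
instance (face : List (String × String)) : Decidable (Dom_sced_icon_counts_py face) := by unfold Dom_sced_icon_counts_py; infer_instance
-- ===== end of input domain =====

-- B replaces A's single counting pass with a recursive decomposition: emit the first
-- mapped icon char's total count, then recurse on the rest with that char removed.

-- ===== PORT A =====
-- module-level table _ICON_KEY_TO_SCED (shared data for both ports)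
def pvIconTable : PySem.Dict Char String :=
  PySem.Dict.mk [('W', "willpowerIcons"), ('I', "intellectIcons"), ('C', "combatIcons"),
                 ('A', "agilityIcons"), ('Q', "wildIcons")]

def sced_icon_counts_py (face : List (String × String)) : List (String × Int) :=
  let icons := ((PySem.Dict.mk face).getD "icons" "").toList
  -- `if key:` fires iff the .get lookup found a value (every table value is a nonempty string)
  let counts := icons.foldl (fun d icon =>
      match pvIconTable.get? icon with
      | some key => d.insert key (d.getD key 0 + 1)
      | none => d) PySem.Dict.empty
  counts.items

-- ===== PORT B =====
-- `{field: 1 + rest.count(c), **_go(...)}`: the recursive dict's keys are fields of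
-- chars ≠ c and the table is injective, so the merge is a plain cons.
def pvGo : List Char → List (String × Int)
  | [] => []
  | c :: rest =>
    match pvIconTable.get? c with
    | none => pvGo rest
    | some field =>
        (field, 1 + (rest.count c : Int)) :: pvGo (rest.filter (fun x => !(x == c)))
termination_by cs => cs.length
decreasing_by
  · simp
  · simp only [List.length_unattach]
    exact Nat.lt_succ_of_le (le_trans (List.length_filter_le _ _) (by simp))

def sced_icon_counts_py_alt (face : List (String × String)) : List (String × Int) :=
  pvGo ((PySem.Dict.mk face).getD "icons" "").toList

-- ===== PRECONDITION & SPEC =====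
def Spec_sced_icon_counts_py (face : List (String × String)) (out : List (String × Int)) : Prop := out = sced_icon_counts_py_alt face
instance (face : List (String × String)) (out : List (String × Int)) : Decidable (Spec_sced_icon_counts_py face out) := by unfold Spec_sced_icon_counts_py; infer_instance

-- ===== CLAIM (what is proved, stated in full; the proofs are below) =====
def Claim_equal_sced_icon_counts_py : Prop := ∀ (face : List (String × String)), Dom_sced_icon_counts_py face → Spec_sced_icon_counts_py face (sced_icon_counts_py face)

-- ===== LEMMAS AND PROOFS =====

-- the table maps distinct keys to distinct fields
theorem pvIconTable_inj (a b : Char) (k : String)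
    (ha : pvIconTable.get? a = some k) (hb : pvIconTable.get? b = some k) : a = b := by
  simp only [pvIconTable, PySem.Dict.get?_mk_cons] at ha hb
  split_ifs at ha hb <;> (try simp only [beq_iff_eq, Option.some.injEq] at *) <;> subst_vars <;>
    first
      | rfl
      | (exact absurd hb (by decide))
      | (exact absurd ha (by decide))
      | (exact absurd ha (by simp [PySem.Dict.get?]))
      | (exact absurd hb (by simp [PySem.Dict.get?]))

-- filtering out c does not change a filterMap whose function kills c
theorem pvFilterMap_filter_of_none {b : Type} (f : Char → Option b) (c : Char)
    (h : f c = none) (s : List Char) :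
    (s.filter (fun y => !(y == c))).filterMap f = s.filterMap f := by
  induction s with
  | nil => rfl
  | cons x t ih =>
    by_cases hx : x = c
    · subst hx; simp [h, ih]
    · cases hfx : f x <;> simp [hx, hfx, ih]

theorem pvFilterMap_filter_some (c : Char) (k : String) (h : pvIconTable.get? c = some k)
    (s : List Char) :
    (s.filter (fun y => !(y == c))).filterMap pvIconTable.get?
      = (s.filterMap pvIconTable.get?).filter (fun y => !(y == k)) := by
  induction s with
  | nil => rfl
  | cons x t ih =>
    by_cases hx : x = c
    · subst hx; simp [h, ih]
    · cases hfx : pvIconTable.get? x with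
      | none => simp [hx, hfx, ih]
      | some k' =>
        have hk : k' ≠ k := fun he => hx (pvIconTable_inj x c k (he ▸ hfx) h)
        simp [hx, hfx, hk, ih]

theorem pvOfList_filterMap (cs : List Char) :
    PySem.Set.ofList (cs.filterMap pvIconTable.get?)
      = (PySem.Set.ofList cs).filterMap pvIconTable.get? := by
  induction cs with
  | nil => rfl
  | cons c t ih =>
    cases hc : pvIconTable.get? c with
    | none =>
      rw [List.filterMap_cons_none hc, ih, PySem.Set.ofList_cons, List.filterMap_cons_none hc]
      exact (pvFilterMap_filter_of_none _ c hc (PySem.Set.ofList t)).symm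
    | some k =>
      rw [List.filterMap_cons_some hc, PySem.Set.ofList_cons, PySem.Set.ofList_cons, ih,
        List.filterMap_cons_some hc]
      show k :: ((PySem.Set.ofList t).filterMap pvIconTable.get?).filter (fun y => !(y == k))
        = k :: ((PySem.Set.ofList t).filter (fun y => !(y == c))).filterMap pvIconTable.get?
      rw [pvFilterMap_filter_some c k hc (PySem.Set.ofList t)]

theorem pvFoldl_filterMap (cs : List Char) (d : PySem.Dict String Int) :
    (cs.filterMap pvIconTable.get?).foldl (fun d k => d.insert k (d.getD k 0 + 1)) d
      = cs.foldl (fun d icon =>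
          match pvIconTable.get? icon with
          | some key => d.insert key (d.getD key 0 + 1)
          | none => d) d := by
  induction cs generalizing d with
  | nil => rfl
  | cons c t ih =>
    cases hc : pvIconTable.get? c <;> simp [hc, ih]

-- A's result, characterised as a filterMap over the ordered dedup of the icon chars
theorem pvMain (cs : List Char) :
    (cs.foldl (fun d icon =>
        match pvIconTable.get? icon with
        | some key => d.insert key (d.getD key 0 + 1)
        | none => d) (PySem.Dict.empty : PySem.Dict String Int)).items
      = (PySem.List.dedup cs).filterMap (fun c =>
          match pvIconTable.get? c with
          | some field => some (field, (cs.count c : Int))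
          | none => none) := by
  rw [← pvFoldl_filterMap, PySem.Dict.foldl_insert_getD_add_one_eq_counter,
    PySem.Dict.items_counter, pvOfList_filterMap, List.map_filterMap, PySem.List.dedup_eq_ofList]
  apply List.filterMap_congr
  intro c _
  cases hc : pvIconTable.get? c with
  | none => simp
  | some k =>
    simp only [Option.map_some]
    have hcount : List.count k (cs.filterMap pvIconTable.get?) = cs.count c := by
      rw [List.count_filterMap, List.count]
      apply List.countP_congr
      intro a _
      constructor
      · intro ha
        have h1 : pvIconTable.get? a = some k := by simpa using ha
        simpa using pvIconTable_inj a c k h1 hc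
      · intro ha
        have h1 : a = c := by simpa using ha
        simp [h1, hc]
    rw [hcount]

-- ordered dedup commutes with removing one element
theorem pvOfList_filter (c : Char) (t : List Char) :
    PySem.Set.ofList (t.filter (fun y => !(y == c)))
      = (PySem.Set.ofList t).filter (fun y => !(y == c)) := by
  induction t with
  | nil => rfl
  | cons x s ih =>
    by_cases hx : x = c
    · subst hx
      simp only [PySem.Set.ofList_cons, PySem.Set.discard, List.filter_cons]
      simp [ih, List.filter_filter]
    · have h1 : (x :: s).filter (fun y => !(y == c)) = x :: s.filter (fun y => !(y == c)) := by
        simp [hx]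
      rw [h1, PySem.Set.ofList_cons, PySem.Set.ofList_cons, ih]
      simp [PySem.Set.discard, List.filter_filter, hx, Bool.and_comm]

-- the WF-recursion bookkeeping form of pvGo's recursive argument
theorem pvUnattachFilter (c : Char) (t : List Char) :
    (List.filter (fun x => match x with | ⟨x, _⟩ => !x == c) t.attach).unattach
      = t.filter (fun x => !(x == c)) := by
  rw [List.unattach_filter (g := fun x => !(x == c)) (hf := fun x h => rfl), List.unattach_attach]

-- B's recursion computes the same dedup/filterMap characterisation of the result
theorem pvGo_eq (cs : List Char) :
    pvGo cs = (PySem.List.dedup cs).filterMap (fun c =>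
        match pvIconTable.get? c with
        | some field => some (field, (cs.count c : Int))
        | none => none) := by
  induction cs using pvGo.induct with
  | case1 => simp [pvGo]
  | case2 c t hc ih =>
    rw [pvGo, hc, ih]
    simp only [PySem.List.dedup_eq_ofList, PySem.Set.ofList_cons, PySem.Set.discard,
      List.filterMap_cons, hc]
    rw [pvFilterMap_filter_of_none _ c (by simp [hc]) (PySem.Set.ofList t)]
    apply List.filterMap_congr
    intro x _
    by_cases hxc : x = c
    · subst hxc; simp [hc]
    · cases hfx : pvIconTable.get? x <;> simp [hfx, List.count_cons, hxc, Ne.symm hxc]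
  | case3 c t field hc ih =>
    rw [pvUnattachFilter] at ih
    rw [pvGo, hc, ih]
    simp only [PySem.List.dedup_eq_ofList, PySem.Set.ofList_cons, PySem.Set.discard,
      List.filterMap_cons, hc]
    congr 1
    · simp [List.count_cons]; ring
    · rw [pvOfList_filter]
      apply List.filterMap_congr
      intro x hx
      have hxc : x ≠ c := by
        have := List.of_mem_filter hx
        simpa using this
      cases hfx : pvIconTable.get? x with
      | none => simp [hfx]
      | some k =>
        have h1 : List.count x (t.filter (fun y => !(y == c))) = List.count x t := by
          rw [List.count_filter]
          simp [hxc]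
        simp [hfx, List.count_cons, Ne.symm hxc, h1]

-- ===== VERDICT (by name: the statement is the Claim_ definition above) =====
theorem sced_icon_counts_py_spec : Claim_equal_sced_icon_counts_py := by
  intro face _
  show sced_icon_counts_py face = sced_icon_counts_py_alt face
  unfold sced_icon_counts_py sced_icon_counts_py_alt
  rw [pvMain, pvGo_eq]
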